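-- pv_equiv track=rewrite | github.com/ananthchellappa/python | circuits/rpt_inst_path.py | find_matches_without_top
-- ===== SOURCE A (Python) =====
-- def build_upward_cell_and_inst_prefixes(parents_by_child, start_cell):
--     """
--     Build all maximal upward prefixes ending at start_cell.
--
--     Returns a list of tuples:
--       (root_cell_name, [inst1, inst2, ..., inst_into_start_cell])
--     """
--     results = []
--
--     def rec(current_cell, suffix_inst_names, active_cells):
--         if current_cell in active_cells:
--             return
--
--         active_cells.add(current_cell)
--
--         parent_edges = parents_by_child.get(current_cell, [])
--         internal_parents = [e for e in parent_edges if e["parent_cell"] is not None]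
--
--         if internal_parents:
--             for edge in internal_parents:
--                 rec(
--                     edge["parent_cell"],
--                     suffix_inst_names + [edge["inst_name"]],
--                     active_cells,
--                 )
--         else:
--             results.append((current_cell, list(reversed(suffix_inst_names))))
--
--         active_cells.remove(current_cell)
--
--     rec(start_cell, [], set())
--     return results
--
-- def find_matches_without_top(parents_by_child, target_cell):
--     """
--     Without explicit --top, report all maximal paths.
--
--     Returns list of tuples:
--       (root_cell_name, [inst1, inst2, ..., inst_target])
--     """
--     results = []
--
--     for match_edge in parents_by_child.get(target_cell, []):
--         parent_cell = match_edge["parent_cell"]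
--         match_inst = match_edge["inst_name"]
--
--         if parent_cell is None:
--             results.append((target_cell, [match_inst]))
--             continue
--
--         prefixes = build_upward_cell_and_inst_prefixes(parents_by_child, parent_cell)
--         for root_cell, inst_names in prefixes:
--             results.append((root_cell, inst_names + [match_inst]))
--
--     return results
-- ===== SOURCE B (Python) =====
-- def find_matches_without_top(parents_by_child, target_cell):
--     """Iterative version: one explicit-stack DFS per starting edge
--     instead of the recursive prefix-builder helper."""
--     results = []
--     for match_edge in parents_by_child.get(target_cell, []):
--         parent_cell = match_edge["parent_cell"]
--         match_inst = match_edge["inst_name"]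
--
--         if parent_cell is None:
--             results.append((target_cell, [match_inst]))
--             continue
--
--         stack = [(parent_cell, [], frozenset())]
--         while stack:
--             cell, suffix, active = stack.pop()
--             if cell in active:
--                 continue
--             internal = [e for e in parents_by_child.get(cell, [])
--                         if e["parent_cell"] is not None]
--             if internal:
--                 new_active = active | {cell}
--                 for e in reversed(internal):
--                     stack.append((e["parent_cell"],
--                                   suffix + [e["inst_name"]],
--                                   new_active))
--             else:
--                 results.append((cell, list(reversed(suffix)) + [match_inst]))
--     return results
-- ===== Notes on version B (the rewrite author's own statement) =====
-- stated objective: alternative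
-- what changed: The recursive prefix-builder helper (two mutually structured recursive walks with a mutable path-local set) is replaced by a single iterative DFS over an explicit stack of (cell, suffix, active) frames, pushing siblings in reverse so results come out in A's exact order.
import Mathlib
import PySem

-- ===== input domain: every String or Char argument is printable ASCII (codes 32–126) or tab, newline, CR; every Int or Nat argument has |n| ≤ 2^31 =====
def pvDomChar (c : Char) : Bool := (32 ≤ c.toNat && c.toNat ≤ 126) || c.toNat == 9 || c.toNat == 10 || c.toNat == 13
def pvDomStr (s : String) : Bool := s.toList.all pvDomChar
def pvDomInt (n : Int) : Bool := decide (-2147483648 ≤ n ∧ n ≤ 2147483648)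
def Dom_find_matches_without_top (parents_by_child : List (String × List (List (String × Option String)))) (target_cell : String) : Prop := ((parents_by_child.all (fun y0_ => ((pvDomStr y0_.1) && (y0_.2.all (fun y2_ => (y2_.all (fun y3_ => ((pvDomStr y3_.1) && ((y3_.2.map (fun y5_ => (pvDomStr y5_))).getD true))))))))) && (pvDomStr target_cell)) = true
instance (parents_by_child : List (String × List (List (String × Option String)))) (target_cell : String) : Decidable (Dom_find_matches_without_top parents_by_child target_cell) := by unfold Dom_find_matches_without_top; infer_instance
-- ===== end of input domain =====

-- B replaces the recursive prefix-builder helper by a single iterative DFS over an explicit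
-- stack of (cell, suffix, active) frames; same results in the same order (objective: alternative).

-- ===== PORT A =====
-- shared edge accessors: e["parent_cell"] and e["inst_name"] (Pre_ guarantees the keys exist
-- and that "inst_name" maps to a string, so the `.join`/`.getD ""` totalisations never fire)
def pvParentOf (e : List (String × Option String)) : Option String :=
  ((PySem.Dict.mk e).get? "parent_cell").join

def pvInstOf (e : List (String × Option String)) : String :=
  (((PySem.Dict.mk e).get? "inst_name").join).getD ""

-- number of dict keys not yet on the current path: termination measure for the upward walk
def pvKeysLeft (parents_by_child : List (String × List (List (String × Option String))))
    (active : PySem.Set String) : Nat :=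
  ((PySem.List.dedup (parents_by_child.map Prod.fst)).filter
    (fun k => !(PySem.Set.contains active k))).length

-- termination lemmas (cited by the ports' decreasing_by)
theorem pvCountP_lt {l : List String} {p q : String → Bool}
    (hpq : ∀ x ∈ l, p x = true → q x = true) {c : String}
    (hc : c ∈ l) (hpc : p c = false) (hqc : q c = true) :
    l.countP p < l.countP q := by
  obtain ⟨l1, l2, rfl⟩ := List.append_of_mem hc
  have h1 := List.countP_mono_left (p := p) (q := q) (l := l1)
    (fun x hx => hpq x (by simp [hx]))
  have h2 := List.countP_mono_left (p := p) (q := q) (l := l2)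
    (fun x hx => hpq x (by simp [hx]))
  simp [List.countP_append, hpc, hqc]
  omega

theorem pvKeysLeft_add_lt (parents_by_child : List (String × List (List (String × Option String))))
    (active : PySem.Set String) (cur : String)
    (hmem : cur ∈ parents_by_child.map Prod.fst)
    (hact : PySem.Set.contains active cur = false) :
    pvKeysLeft parents_by_child (PySem.Set.add active cur) < pvKeysLeft parents_by_child active := by
  unfold pvKeysLeft
  rw [← List.countP_eq_length_filter, ← List.countP_eq_length_filter]
  refine pvCountP_lt ?_ ((PySem.List.mem_dedup _ _).mpr hmem) ?_ ?_
  · intro x _ hx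
    simp at hx ⊢
    exact hx.1
  · simp
  · simp at hact ⊢
    exact hact

theorem pvMem_keys_of_get?_some {β : Type} (pbc : List (String × β)) (cur : String) (v : β)
    (h : (PySem.Dict.mk pbc).get? cur = some v) : cur ∈ pbc.map Prod.fst := by
  induction pbc with
  | nil => simp [PySem.Dict.get?] at h
  | cons p rest ih =>
    rw [PySem.Dict.get?_mk_cons] at h
    by_cases hk : p.1 == cur
    · simp at hk; simp [hk]
    · simp [hk] at h; simp [ih h]

theorem pvGetD_len_le {β : Type} (pbc : List (String × List β)) (cur : String) :
    ((PySem.Dict.mk pbc).getD cur []).length ≤ (pbc.map (fun p => p.2.length)).sum := by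
  induction pbc with
  | nil => simp [PySem.Dict.getD, PySem.Dict.get?]
  | cons p rest ih =>
    rw [PySem.Dict.getD_eq_get?_getD, PySem.Dict.get?_mk_cons]
    by_cases hk : p.1 == cur
    · simp [hk]
    · rw [if_neg (by simp_all)]
      rw [← PySem.Dict.getD_eq_get?_getD]
      simp only [List.map_cons, List.sum_cons]
      omega

-- A's recursive helper build_upward_cell_and_inst_prefixes / rec: the mutable `active_cells`
-- set (add before the loop, remove after) is threaded as the value `active.add cur` given to
-- every recursive call; the shared `results` list is the returned list, appended in call order.
def pvRec (parents_by_child : List (String × List (List (String × Option String))))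
    (cur : String) (suffix : List String) (active : PySem.Set String) :
    List (String × List String) :=
  if PySem.Set.contains active cur then []
  else if (((PySem.Dict.mk parents_by_child).getD cur []).filter
      (fun e => (pvParentOf e).isSome)).isEmpty then
    [(cur, suffix.reverse)]
  else
    (((PySem.Dict.mk parents_by_child).getD cur []).filter
      (fun e => (pvParentOf e).isSome)).foldl
      (fun acc e => acc ++ pvRec parents_by_child ((pvParentOf e).getD "")
        (suffix ++ [pvInstOf e]) (PySem.Set.add active cur)) []
termination_by pvKeysLeft parents_by_child active
decreasing_by
  rename_i hact hne
  refine pvKeysLeft_add_lt _ _ _ ?_ (Bool.not_eq_true _ ▸ hact)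
  rcases hv : (PySem.Dict.mk parents_by_child).get? cur with _ | v
  · exfalso
    apply hne
    simp [PySem.Dict.getD_eq_get?_getD, hv]
  · exact pvMem_keys_of_get?_some _ _ _ hv

def find_matches_without_top (parents_by_child : List (String × List (List (String × Option String)))) (target_cell : String) : List (String × List String) :=
  ((PySem.Dict.mk parents_by_child).getD target_cell []).foldl
    (fun results match_edge =>
      match pvParentOf match_edge with
      | none => results ++ [(target_cell, [pvInstOf match_edge])]
      | some p =>
        (pvRec parents_by_child p [] PySem.Set.empty).foldl
          (fun acc pr => acc ++ [(pr.1, pr.2 ++ [pvInstOf match_edge])]) results) []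

-- ===== PORT B =====
-- total-edge-count-based potential: termination measure for the explicit-stack DFS loop
def pvPhi (parents_by_child : List (String × List (List (String × Option String))))
    (stack : List (String × List String × PySem.Set String)) : Nat :=
  (stack.map (fun f =>
    ((parents_by_child.map (fun p => p.2.length)).sum + 2) ^ pvKeysLeft parents_by_child f.2.2)).sum

-- B's while-loop over the explicit stack; the list head is the top of the stack, so Python's
-- "push reversed(internal), then pop" = prepend internal's frames in order.
def pvStep (parents_by_child : List (String × List (List (String × Option String))))
    (minst : String) (stack : List (String × List String × PySem.Set String)) :
    List (String × List String) :=
  match stack with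
  | [] => []
  | (cell, suffix, active) :: rest =>
    if PySem.Set.contains active cell then pvStep parents_by_child minst rest
    else if (((PySem.Dict.mk parents_by_child).getD cell []).filter
        (fun e => (pvParentOf e).isSome)).isEmpty then
      (cell, suffix.reverse ++ [minst]) :: pvStep parents_by_child minst rest
    else
      pvStep parents_by_child minst
        (((((PySem.Dict.mk parents_by_child).getD cell []).filter
            (fun e => (pvParentOf e).isSome)).map (fun e =>
          ((pvParentOf e).getD "", suffix ++ [pvInstOf e], PySem.Set.add active cell))) ++ rest)
termination_by pvPhi parents_by_child stack
decreasing_by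
  · simp only [pvPhi, List.map_cons, List.sum_cons]
    have := Nat.pow_pos (n := pvKeysLeft parents_by_child active)
      (show 0 < (parents_by_child.map (fun p => p.2.length)).sum + 2 by omega)
    omega
  · simp only [pvPhi, List.map_cons, List.sum_cons]
    have := Nat.pow_pos (n := pvKeysLeft parents_by_child active)
      (show 0 < (parents_by_child.map (fun p => p.2.length)).sum + 2 by omega)
    omega
  · rename_i hact hne
    have hmem : cell ∈ parents_by_child.map Prod.fst := by
      rcases hv : (PySem.Dict.mk parents_by_child).get? cell with _ | v
      · exfalso
        apply hne
        simp [PySem.Dict.getD_eq_get?_getD, hv]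
      · exact pvMem_keys_of_get?_some _ _ _ hv
    have hmu : pvKeysLeft parents_by_child (PySem.Set.add active cell) <
        pvKeysLeft parents_by_child active :=
      pvKeysLeft_add_lt _ _ _ hmem (Bool.not_eq_true _ ▸ hact)
    have hlen : (((PySem.Dict.mk parents_by_child).getD cell []).filter
        (fun e => (pvParentOf e).isSome)).length ≤
        (parents_by_child.map (fun p => p.2.length)).sum :=
      Nat.le_trans (List.length_filter_le _ _) (pvGetD_len_le _ _)
    simp only [pvPhi, List.map_append, List.sum_append, List.map_map, List.map_cons,
      List.sum_cons, Function.comp_def, List.map_const', List.sum_replicate, smul_eq_mul]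
    have hstep : (((PySem.Dict.mk parents_by_child).getD cell []).filter
          (fun e => (pvParentOf e).isSome)).length *
        ((parents_by_child.map (fun p => p.2.length)).sum + 2) ^
          pvKeysLeft parents_by_child (PySem.Set.add active cell) <
        ((parents_by_child.map (fun p => p.2.length)).sum + 2) ^
          pvKeysLeft parents_by_child active := by
      calc (((PySem.Dict.mk parents_by_child).getD cell []).filter
            (fun e => (pvParentOf e).isSome)).length *
          ((parents_by_child.map (fun p => p.2.length)).sum + 2) ^
            pvKeysLeft parents_by_child (PySem.Set.add active cell)
          < ((parents_by_child.map (fun p => p.2.length)).sum + 2) *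
            ((parents_by_child.map (fun p => p.2.length)).sum + 2) ^
              pvKeysLeft parents_by_child (PySem.Set.add active cell) := by
            exact Nat.mul_lt_mul_of_lt_of_le (by omega) (Nat.le_refl _)
              (Nat.pow_pos (by omega))
        _ = ((parents_by_child.map (fun p => p.2.length)).sum + 2) ^
              (pvKeysLeft parents_by_child (PySem.Set.add active cell) + 1) := by
            rw [Nat.pow_succ, Nat.mul_comm]
        _ ≤ ((parents_by_child.map (fun p => p.2.length)).sum + 2) ^
              pvKeysLeft parents_by_child active :=
            Nat.pow_le_pow_right (by omega) (by omega)
    exact Nat.add_lt_add_right hstep _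

def find_matches_without_top_alt (parents_by_child : List (String × List (List (String × Option String)))) (target_cell : String) : List (String × List String) :=
  ((PySem.Dict.mk parents_by_child).getD target_cell []).foldl
    (fun results match_edge =>
      match pvParentOf match_edge with
      | none => results ++ [(target_cell, [pvInstOf match_edge])]
      | some p =>
        results ++ pvStep parents_by_child (pvInstOf match_edge) [(p, [], PySem.Set.empty)]) []

-- ===== PRECONDITION & SPEC =====
-- Pre_ excludes inputs on which the Python raises KeyError (an edge dict without a
-- "parent_cell"/"inst_name" key) or returns a non-String inst (inst_name mapped to None);
-- the well-formedness of the edge dicts is checked over ALL edges (conservative: A only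
-- touches edges reachable upward from target_cell), except that the first disjunct admits
-- every input whose target_cell has no edge list, where A returns [] without reading any edge.
def Pre_find_matches_without_top (parents_by_child : List (String × List (List (String × Option String)))) (target_cell : String) : Prop :=
  (PySem.Dict.mk parents_by_child).getD target_cell [] = [] ∨
  ∀ p ∈ parents_by_child, ∀ e ∈ p.2,
    ((PySem.Dict.mk e).get? "parent_cell").isSome = true ∧
    (((PySem.Dict.mk e).get? "inst_name").join).isSome = true
instance (parents_by_child : List (String × List (List (String × Option String)))) (target_cell : String) : Decidable (Pre_find_matches_without_top parents_by_child target_cell) := by unfold Pre_find_matches_without_top; infer_instance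

def pvWitness_find_matches_without_top : (List (String × List (List (String × Option String)))) × String :=
  ([("mid", [[("parent_cell", some "top"), ("inst_name", some "i0")]]),
    ("top", [[("parent_cell", none), ("inst_name", some "i1")]])], "mid")

def Spec_find_matches_without_top (parents_by_child : List (String × List (List (String × Option String)))) (target_cell : String) (out : List (String × List String)) : Prop := out = find_matches_without_top_alt parents_by_child target_cell
instance (parents_by_child : List (String × List (List (String × Option String)))) (target_cell : String) (out : List (String × List String)) : Decidable (Spec_find_matches_without_top parents_by_child target_cell out) := by unfold Spec_find_matches_without_top; infer_instance

-- ===== CLAIM (what is proved, stated in full; the proofs are below) =====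
def Claim_equal_find_matches_without_top : Prop := ∀ (parents_by_child : List (String × List (List (String × Option String)))) (target_cell : String), Dom_find_matches_without_top parents_by_child target_cell → Pre_find_matches_without_top parents_by_child target_cell → Spec_find_matches_without_top parents_by_child target_cell (find_matches_without_top parents_by_child target_cell)

-- ===== LEMMAS AND PROOFS =====
-- the stack machine computes, frame by frame, exactly what A's recursion computes
theorem pvStep_eq_flatMap (parents_by_child : List (String × List (List (String × Option String))))
    (minst : String) (stack : List (String × List String × PySem.Set String)) :
    pvStep parents_by_child minst stack =
      stack.flatMap (fun f => (pvRec parents_by_child f.1 f.2.1 f.2.2).map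
        (fun pr => (pr.1, pr.2 ++ [minst]))) := by
  induction stack using pvStep.induct parents_by_child with
  | case1 => simp [pvStep]
  | case2 cell suffix active rest hact ih =>
    conv_lhs => rw [pvStep]
    conv_rhs => rw [List.flatMap_cons, pvRec]
    rw [if_pos hact, if_pos hact, ih]
    simp
  | case3 cell suffix active rest hact hempty ih =>
    conv_lhs => rw [pvStep]
    conv_rhs => rw [List.flatMap_cons, pvRec]
    rw [if_neg hact, if_neg hact, if_pos hempty, if_pos hempty, ih]
    simp
  | case4 cell suffix active rest hact hempty ih =>
    conv_lhs => rw [pvStep]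
    conv_rhs => rw [List.flatMap_cons, pvRec]
    rw [if_neg hact, if_neg hact, if_neg hempty, if_neg hempty, ih,
      PySem.List.foldl_append_eq_flatMap]
    simp [List.flatMap_append, List.flatMap_map, List.map_flatMap]

theorem pvFold_eq (parents_by_child : List (String × List (List (String × Option String))))
    (target_cell : String) :
    find_matches_without_top parents_by_child target_cell =
      find_matches_without_top_alt parents_by_child target_cell := by
  unfold find_matches_without_top find_matches_without_top_alt
  congr 1
  funext results match_edge
  cases hp : pvParentOf match_edge with
  | none => rfl
  | some p =>
    simp only [pvStep_eq_flatMap, List.flatMap_cons, List.flatMap_nil, List.append_nil]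
    rw [PySem.List.foldl_append_singleton_eq_map]

-- ===== VERDICT (by name: the statement is the Claim_ definition above) =====
theorem find_matches_without_top_spec : Claim_equal_find_matches_without_top := by
  intro parents_by_child target_cell _ _
  exact pvFold_eq parents_by_child target_cell
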